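-- pv_equiv track=rewrite | github.com/Admassfrancisedgarstanley947/codevista | codevista/report.py | build_size_distribution
-- ===== SOURCE A (Python) =====
-- def build_size_distribution(files):
--     bins = {'Tiny (<1KB)': 0, 'Small (1-10KB)': 0, 'Medium (10-50KB)': 0, 'Large (50-200KB)': 0, 'Huge (200KB+)': 0}
--     for f in files:
--         s = f['size']
--         if s < 1024: bins['Tiny (<1KB)'] += 1
--         elif s < 10240: bins['Small (1-10KB)'] += 1
--         elif s < 51200: bins['Medium (10-50KB)'] += 1
--         elif s < 204800: bins['Large (50-200KB)'] += 1
--         else: bins['Huge (200KB+)'] += 1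
--     return bins
-- ===== SOURCE B (Python) =====
-- def build_size_distribution(files):
--     sizes = [f['size'] for f in files]
--     cum = [sum(1 for s in sizes if s < t) for t in (1024, 10240, 51200, 204800)] + [len(sizes)]
--     counts = [cum[0]] + [cum[i] - cum[i - 1] for i in range(1, 5)]
--     labels = ['Tiny (<1KB)', 'Small (1-10KB)', 'Medium (10-50KB)', 'Large (50-200KB)', 'Huge (200KB+)']
--     return dict(zip(labels, counts))
-- ===== Notes on version B (the rewrite author's own statement) =====
-- stated objective: alternative
-- what changed: Replaces A's single pass with an if/elif chain of per-bucket dict increments by staged passes: one cumulative counting pass per threshold (how many sizes are below it) plus the total length, then adjacent differencing of the cumulative counts yields the five bin counts, zipped with the labels at the end.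
import Mathlib
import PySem

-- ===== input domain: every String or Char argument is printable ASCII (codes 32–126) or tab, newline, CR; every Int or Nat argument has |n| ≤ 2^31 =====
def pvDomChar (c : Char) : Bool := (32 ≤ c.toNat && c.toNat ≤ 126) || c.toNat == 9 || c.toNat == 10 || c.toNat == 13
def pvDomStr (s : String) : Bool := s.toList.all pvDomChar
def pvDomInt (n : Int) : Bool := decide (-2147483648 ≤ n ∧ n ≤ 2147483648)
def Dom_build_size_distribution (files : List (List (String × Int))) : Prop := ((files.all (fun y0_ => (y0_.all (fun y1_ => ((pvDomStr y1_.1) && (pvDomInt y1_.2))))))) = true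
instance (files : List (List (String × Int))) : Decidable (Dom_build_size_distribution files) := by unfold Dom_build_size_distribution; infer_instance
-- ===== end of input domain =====

-- B replaces A's single-pass if/elif increments by staged cumulative counting passes plus
-- differencing; equivalence is about the return value only (neither mutates its argument).

-- ===== PORT A =====
-- one loop step of A: read f['size'] (the default 0 is never used inside Pre_) and bump the matching bin
def pvStepA (bins : PySem.Dict String Int) (f : List (String × Int)) : PySem.Dict String Int :=
  let s := (PySem.Dict.ofList f).getD "size" 0
  if s < 1024 then bins.modify "Tiny (<1KB)" 0 (· + 1)
  else if s < 10240 then bins.modify "Small (1-10KB)" 0 (· + 1)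
  else if s < 51200 then bins.modify "Medium (10-50KB)" 0 (· + 1)
  else if s < 204800 then bins.modify "Large (50-200KB)" 0 (· + 1)
  else bins.modify "Huge (200KB+)" 0 (· + 1)

def build_size_distribution (files : List (List (String × Int))) : List (String × Int) :=
  let bins : PySem.Dict String Int := PySem.Dict.ofList
    [("Tiny (<1KB)", 0), ("Small (1-10KB)", 0), ("Medium (10-50KB)", 0),
     ("Large (50-200KB)", 0), ("Huge (200KB+)", 0)]
  (files.foldl pvStepA bins).items

-- ===== PORT B =====
def pvLabels : List String :=
  ["Tiny (<1KB)", "Small (1-10KB)", "Medium (10-50KB)", "Large (50-200KB)", "Huge (200KB+)"]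

-- sizes = [f['size'] for f in files]
def pvSizes (files : List (List (String × Int))) : List Int :=
  files.map (fun f => (PySem.Dict.ofList f).getD "size" 0)

-- sum(1 for s in sizes if s < t)
def pvCum (sizes : List Int) (t : Int) : Int :=
  ((sizes.filter (fun s => s < t)).length : Int)

def build_size_distribution_alt (files : List (List (String × Int))) : List (String × Int) :=
  let sizes := pvSizes files
  let c0 := pvCum sizes 1024
  let c1 := pvCum sizes 10240
  let c2 := pvCum sizes 51200
  let c3 := pvCum sizes 204800
  pvLabels.zip [c0, c1 - c0, c2 - c1, c3 - c2, (sizes.length : Int) - c3]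

-- ===== PRECONDITION & SPEC =====
-- A raises KeyError on any file record without a 'size' key; Pre_ excludes exactly those inputs.
def Pre_build_size_distribution (files : List (List (String × Int))) : Prop :=
  ∀ f ∈ files, "size" ∈ f.map Prod.fst
instance (files : List (List (String × Int))) : Decidable (Pre_build_size_distribution files) := by
  unfold Pre_build_size_distribution; infer_instance

def pvWitness_build_size_distribution : (List (List (String × Int))) :=
  [[("size", 500)], [("size", 1024)], [("name", 3), ("size", 300000)]]

def Spec_build_size_distribution (files : List (List (String × Int))) (out : List (String × Int)) : Prop := out = build_size_distribution_alt files
instance (files : List (List (String × Int))) (out : List (String × Int)) : Decidable (Spec_build_size_distribution files out) := by unfold Spec_build_size_distribution; infer_instance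

-- ===== CLAIM (what is proved, stated in full; the proofs are below) =====
def Claim_equal_build_size_distribution : Prop := ∀ (files : List (List (String × Int))), Dom_build_size_distribution files → Pre_build_size_distribution files → Spec_build_size_distribution files (build_size_distribution files)

-- ===== LEMMAS AND PROOFS =====

-- A's running dict state, as a literal
def pvZipState (a b c d e : Int) : PySem.Dict String Int :=
  PySem.Dict.mk [("Tiny (<1KB)", a), ("Small (1-10KB)", b), ("Medium (10-50KB)", c),
                 ("Large (50-200KB)", d), ("Huge (200KB+)", e)]

theorem pvCum_cons (s : Int) (sz : List Int) (t : Int) :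
    pvCum (s :: sz) t = pvCum sz t + (if s < t then 1 else 0) := by
  by_cases h : s < t <;> simp [pvCum, h]

-- the invariant: A's fold over files, started at pvZipState a b c d e, yields
-- pvLabels zipped with the accumulators plus B's staged counts of files
theorem pvFold_inv (files : List (List (String × Int))) (a b c d e : Int) :
    (files.foldl pvStepA (pvZipState a b c d e)).items =
      pvLabels.zip [a + pvCum (pvSizes files) 1024,
        b + (pvCum (pvSizes files) 10240 - pvCum (pvSizes files) 1024),
        c + (pvCum (pvSizes files) 51200 - pvCum (pvSizes files) 10240),
        d + (pvCum (pvSizes files) 204800 - pvCum (pvSizes files) 51200),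
        e + (((pvSizes files).length : Int) - pvCum (pvSizes files) 204800)] := by
  induction files generalizing a b c d e with
  | nil => simp [pvCum, pvSizes, pvLabels, pvZipState]
  | cons f rest ih =>
    have hsz : pvSizes (f :: rest) = ((PySem.Dict.ofList f).getD "size" 0) :: pvSizes rest := by
      simp [pvSizes]
    simp only [List.foldl_cons, pvStepA, hsz, List.length_cons]
    generalize (PySem.Dict.ofList f).getD "size" 0 = s
    by_cases h1 : s < 1024
    · have hstep : (pvZipState a b c d e).modify "Tiny (<1KB)" 0 (· + 1) = pvZipState (a + 1) b c d e := rfl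
      rw [if_pos h1, hstep, ih]
      apply congrArg
      simp only [pvCum_cons, if_pos h1, if_pos (show s < 10240 by omega),
        if_pos (show s < 51200 by omega), if_pos (show s < 204800 by omega),
        List.cons.injEq, and_true]
      omega
    · by_cases h2 : s < 10240
      · have hstep : (pvZipState a b c d e).modify "Small (1-10KB)" 0 (· + 1) = pvZipState a (b + 1) c d e := rfl
        rw [if_neg h1, if_pos h2, hstep, ih]
        apply congrArg
        simp only [pvCum_cons, if_neg h1, if_pos h2, if_pos (show s < 51200 by omega),
          if_pos (show s < 204800 by omega), List.cons.injEq, and_true]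
        omega
      · by_cases h3 : s < 51200
        · have hstep : (pvZipState a b c d e).modify "Medium (10-50KB)" 0 (· + 1) = pvZipState a b (c + 1) d e := rfl
          rw [if_neg h1, if_neg h2, if_pos h3, hstep, ih]
          apply congrArg
          simp only [pvCum_cons, if_neg h1, if_neg h2, if_pos h3,
            if_pos (show s < 204800 by omega), List.cons.injEq, and_true]
          omega
        · by_cases h4 : s < 204800
          · have hstep : (pvZipState a b c d e).modify "Large (50-200KB)" 0 (· + 1) = pvZipState a b c (d + 1) e := rfl
            rw [if_neg h1, if_neg h2, if_neg h3, if_pos h4, hstep, ih]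
            apply congrArg
            simp only [pvCum_cons, if_neg h1, if_neg h2, if_neg h3, if_pos h4,
              List.cons.injEq, and_true]
            omega
          · have hstep : (pvZipState a b c d e).modify "Huge (200KB+)" 0 (· + 1) = pvZipState a b c d (e + 1) := rfl
            rw [if_neg h1, if_neg h2, if_neg h3, if_neg h4, hstep, ih]
            apply congrArg
            simp only [pvCum_cons, if_neg h1, if_neg h2, if_neg h3, if_neg h4,
              List.cons.injEq, and_true]
            omega

-- ===== VERDICT (by name: the statement is the Claim_ definition above) =====
theorem build_size_distribution_spec : Claim_equal_build_size_distribution := by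
  intro files _ _
  show _ = _
  have h := pvFold_inv files 0 0 0 0 0
  simpa [build_size_distribution, build_size_distribution_alt, pvZipState] using h
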